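-- pv_equiv track=rewrite | github.com/AlexisGR117/AYED | Programas/WonderSquare.py | llenar
-- ===== SOURCE A (Python) =====
-- def llenar(matriz, numero):
--     """
--     Funcion que dado un numero n da el wondersquare de n
--     (list 2D, int) -> list2D
--     """
--     numero2 = (numero*2)-2
--     for i in range(numero):
--         for j in range(i, numero2+1):
--             matriz[i][j] = numero
--             matriz[numero2][j] = numero
--         for k in range(i+1, numero2+1):
--             matriz[k][i] = numero
--             matriz[k][numero2] = numero
--         numero2 -= 1
--         numero -= 1
--     return matriz
-- ===== SOURCE B (Python) =====
-- def llenar(matriz, numero):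
--     # Per-cell closed form instead of layer-by-layer perimeter drawing:
--     # cell (r, c) of the (2*numero-1)-square lies on ring min(r, c, m-r, m-c)
--     # and gets value numero minus that ring index. Mutates matriz in place like A.
--     m = 2 * numero - 2
--     for r in range(2 * numero - 1):
--         for c in range(2 * numero - 1):
--             matriz[r][c] = numero - min(r, c, m - r, m - c)
--     return matriz
-- ===== Notes on version B (the rewrite author's own statement) =====
-- stated objective: simpler
-- what changed: B replaces A's layer-by-layer perimeter drawing (mutable shrinking square with decremented counters) by a single flat double loop writing each cell once via the closed-form ring formula numero - min(r, c, m-r, m-c) with m = 2*numero-2.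
import Mathlib
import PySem

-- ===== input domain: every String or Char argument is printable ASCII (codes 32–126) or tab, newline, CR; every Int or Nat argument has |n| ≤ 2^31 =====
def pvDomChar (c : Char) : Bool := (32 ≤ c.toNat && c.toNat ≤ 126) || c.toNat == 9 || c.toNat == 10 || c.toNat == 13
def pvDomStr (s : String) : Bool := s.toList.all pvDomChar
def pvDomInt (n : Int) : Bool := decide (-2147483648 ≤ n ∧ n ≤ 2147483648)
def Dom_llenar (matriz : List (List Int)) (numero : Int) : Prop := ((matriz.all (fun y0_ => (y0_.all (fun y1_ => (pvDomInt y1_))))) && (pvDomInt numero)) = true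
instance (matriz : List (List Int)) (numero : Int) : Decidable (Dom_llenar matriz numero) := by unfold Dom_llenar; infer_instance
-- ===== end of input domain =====

-- B replaces A's layer-by-layer perimeter drawing by a per-cell closed-form ring formula
-- (objective: simpler). Both Pythons mutate matriz in place; the equivalence proved here is
-- about the returned value (B performs the same in-place writes as A, in a different order).


-- ===== PORT A =====
-- 'matriz[i][j] = v': read row i, write element j in it, write the row back (all Python-exact).
def setI (m : List (List Int)) (i j v : Int) : List (List Int) :=
  PySem.List.pySetD m i (PySem.List.pySetD (PySem.List.pyGetD m i []) j v)

-- the 'for i in range(numero)' loop: fuel = number of iterations left, i the loop counter,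
-- numero2/numero the two mutated Python variables.
def llenarLoop (matriz : List (List Int)) (numero2 numero i : Int) : Nat → List (List Int)
  | 0 => matriz
  | f+1 =>
    let m1 := (PySem.List.pyRange i (numero2+1) 1).foldl
      (fun m j => setI (setI m i j numero) numero2 j numero) matriz
    let m2 := (PySem.List.pyRange (i+1) (numero2+1) 1).foldl
      (fun m k => setI (setI m k i numero) k numero2 numero) m1
    llenarLoop m2 (numero2-1) (numero-1) (i+1) f

def llenar (matriz : List (List Int)) (numero : Int) : List (List Int) :=
  llenarLoop matriz (numero*2-2) numero 0 numero.toNat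

-- ===== PORT B =====
def llenar_alt (matriz : List (List Int)) (numero : Int) : List (List Int) :=
  let m := 2*numero - 2
  (PySem.List.pyRange 0 (2*numero - 1) 1).foldl (fun mat r =>
    (PySem.List.pyRange 0 (2*numero - 1) 1).foldl (fun mat c =>
      setI mat r c (numero - min (min r c) (min (m - r) (m - c)))) mat) matriz

-- ===== PRECONDITION & SPEC =====
-- Pre_ excludes exactly the inputs where Python A raises IndexError: numero ≥ 1 while matriz
-- lacks the full (2*numero-1)×(2*numero-1) top-left block (B raises there as well).
def Pre_llenar (matriz : List (List Int)) (numero : Int) : Prop :=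
  numero ≤ 0 ∨ (2*numero - 1 ≤ (matriz.length : Int) ∧
    ∀ row ∈ matriz.take (2*numero - 1).toNat, 2*numero - 1 ≤ (row.length : Int))
instance (matriz : List (List Int)) (numero : Int) : Decidable (Pre_llenar matriz numero) := by
  unfold Pre_llenar; infer_instance

def pvWitness_llenar : List (List Int) × Int :=
  ([[0,0,0],[0,0,0],[0,0,0]], 2)

def Spec_llenar (matriz : List (List Int)) (numero : Int) (out : List (List Int)) : Prop := out = llenar_alt matriz numero
instance (matriz : List (List Int)) (numero : Int) (out : List (List Int)) : Decidable (Spec_llenar matriz numero out) := by unfold Spec_llenar; infer_instance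

-- ===== CLAIM (what is proved, stated in full; the proofs are below) =====
def Claim_equal_llenar : Prop := ∀ (matriz : List (List Int)) (numero : Int), Dom_llenar matriz numero → Pre_llenar matriz numero → Spec_llenar matriz numero (llenar matriz numero)

-- ===== LEMMAS AND PROOFS =====

-- row-length profile of a matrix; every write of either port preserves it
def shape (m : List (List Int)) : List Nat := m.map List.length

-- the cell at (r, c), if present
def getc (m : List (List Int)) (r c : Nat) : Option Int := m[r]?.bind (fun row => row[c]?)

-- the matrix contains the full (2n0-1)×(2n0-1) top-left block
def SqN (m : List (List Int)) (n0 : Int) : Prop :=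
  2*n0 - 1 ≤ (m.length : Int) ∧
  ∀ r : Nat, (r : Int) < 2*n0 - 1 → 2*n0 - 1 ≤ ((m.getD r []).length : Int)

lemma pyIdx_lt {n : Nat} {i : Int} {k : Nat} (h : PySem.List.pyIdx? n i = some k) :
    k < n := by
  unfold PySem.List.pyIdx? at h
  split_ifs at h with h1 h2 h3 <;> simp_all <;> omega

lemma shape_setI (m : List (List Int)) (i j v : Int) : shape (setI m i j v) = shape m := by
  unfold setI PySem.List.pySetD PySem.List.pySet?
  cases h : PySem.List.pyIdx? m.length i with
  | none => simp [h]
  | some k =>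
    have hk : k < m.length := pyIdx_lt h
    have hg : PySem.List.pyGetD m i [] = m[k] := by
      unfold PySem.List.pyGetD PySem.List.pyGet?
      rw [h]
      simp [List.getElem?_eq_getElem hk]
    simp only [h, Option.map_some, Option.getD_some]
    rw [hg]
    unfold shape
    rw [List.map_set]
    have : ((Option.map (fun k2 => m[k].set k2 v) (PySem.List.pyIdx? m[k].length j)).getD m[k]).length = m[k].length := by
      cases h2 : PySem.List.pyIdx? m[k].length j with
      | none => simp
      | some k2 => simp
    rw [this]
    apply List.ext_getElem?
    intro t
    rw [List.getElem?_set]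
    split_ifs with ht h2
    · subst ht; rw [List.getElem?_map, List.getElem?_eq_getElem hk]; rfl
    · rw [List.length_map] at h2; omega
    · rfl

lemma shape_foldl {β : Type} (f : List (List Int) → β → List (List Int))
    (h : ∀ m x, shape (f m x) = shape m) :
    ∀ (l : List β) (m : List (List Int)), shape (l.foldl f m) = shape m := by
  intro l
  induction l with
  | nil => intro m; rfl
  | cons x t ih => intro m; rw [List.foldl_cons, ih, h]

lemma length_of_shape {m1 m2 : List (List Int)} (h : shape m1 = shape m2) :
    m1.length = m2.length := by
  have := congrArg List.length h
  simpa [shape] using this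

lemma getD_length_of_shape {m1 m2 : List (List Int)} (h : shape m1 = shape m2) (r : Nat)
    (hr : r < m1.length) : (m1.getD r []).length = (m2.getD r []).length := by
  have hl : m1.length = m2.length := length_of_shape h
  have h1 : (shape m1)[r]? = (shape m2)[r]? := by rw [h]
  rw [shape, shape, List.getElem?_map, List.getElem?_map,
      List.getElem?_eq_getElem hr, List.getElem?_eq_getElem (by omega : r < m2.length)] at h1
  simp only [Option.map_some, Option.some.injEq] at h1
  rw [List.getD_eq_getElem _ _ hr, List.getD_eq_getElem _ _ (by omega : r < m2.length), h1]

lemma SqN_shape {m1 m2 : List (List Int)} {n0 : Int} (h : shape m1 = shape m2)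
    (hs : SqN m1 n0) : SqN m2 n0 := by
  obtain ⟨h1, h2⟩ := hs
  refine ⟨by rw [← length_of_shape h]; exact h1, ?_⟩
  intro r hr
  have hrl : r < m1.length := by omega
  rw [← getD_length_of_shape h r hrl]
  exact h2 r hr

lemma SqN_cell {m : List (List Int)} {n0 : Int} (h : SqN m n0) {i j : Int}
    (hi : 0 ≤ i) (hiN : i < 2*n0 - 1) (hj : 0 ≤ j) (hjN : j < 2*n0 - 1) :
    i < (m.length : Int) ∧ j < ((m.getD i.toNat []).length : Int) := by
  obtain ⟨h1, h2⟩ := h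
  have := h2 i.toNat (by omega)
  omega

lemma getc_setI (m : List (List Int)) (i j v : Int) (hi : 0 ≤ i) (hj : 0 ≤ j)
    (hiL : i < (m.length : Int)) (hjL : j < ((m.getD i.toNat []).length : Int)) (r c : Nat) :
    getc (setI m i j v) r c = if (r : Int) = i ∧ (c : Int) = j then some v else getc m r c := by
  have hiN : i.toNat < m.length := by omega
  have hjN : j.toNat < (m.getD i.toNat []).length := by omega
  have hrow : m.getD i.toNat [] = m[i.toNat] := List.getD_eq_getElem _ _ hiN
  unfold setI getc
  rw [PySem.List.pySetD_of_nonneg _ _ hi, PySem.List.pyGetD_of_nonneg _ _ hi,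
      PySem.List.pySetD_of_nonneg _ _ hj]
  rw [List.getElem?_set]
  by_cases hr : i.toNat = r
  · subst hr
    rw [if_pos rfl, if_pos hiN]
    simp only [Option.bind_some]
    rw [List.getElem?_set]
    by_cases hc : j.toNat = c
    · subst hc
      rw [if_pos rfl, if_pos hjN, if_pos (by omega)]
    · rw [if_neg hc, if_neg (by omega), List.getElem?_eq_getElem hiN]
      simp only [Option.bind_some]
      rw [hrow]
  · rw [if_neg hr, if_neg (by omega)]

lemma mat_ext {m1 m2 : List (List Int)} (h : shape m1 = shape m2)
    (hg : ∀ r c, getc m1 r c = getc m2 r c) : m1 = m2 := by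
  have hlen : m1.length = m2.length := length_of_shape h
  apply List.ext_getElem?
  intro r
  by_cases hr : r < m1.length
  · rw [List.getElem?_eq_getElem hr, List.getElem?_eq_getElem (by omega : r < m2.length)]
    congr 1
    apply List.ext_getElem?
    intro c
    have hgc := hg r c
    unfold getc at hgc
    rw [List.getElem?_eq_getElem hr, List.getElem?_eq_getElem (by omega : r < m2.length)] at hgc
    simpa using hgc
  · rw [List.getElem?_eq_none (by omega), List.getElem?_eq_none (by omega)]

-- A's first inner loop (the two horizontal edges of ring i)
lemma rowPass (n0 v i n2 : Int) (hi : 0 ≤ i) (hn2 : 0 ≤ n2)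
    (hiN : i < 2*n0 - 1) (hn2N : n2 < 2*n0 - 1) :
    ∀ (t : Nat) (a : Int) (m : List (List Int)), SqN m n0 → 0 ≤ a → (n2 + 1 - a).toNat = t →
    ∀ (r c : Nat),
      getc ((PySem.List.pyRange a (n2+1) 1).foldl
              (fun m j => setI (setI m i j v) n2 j v) m) r c
        = if ((r:Int) = i ∨ (r:Int) = n2) ∧ a ≤ (c:Int) ∧ (c:Int) ≤ n2 then some v
          else getc m r c := by
  intro t
  induction t with
  | zero =>
    intro a m hSq ha ht r c
    rw [PySem.List.pyRange_one_eq_nil (by omega), List.foldl_nil,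
        if_neg (by rintro ⟨_, h1, h2⟩; omega)]
  | succ t ih =>
    intro a m hSq ha ht r c
    have hab : a < n2 + 1 := by omega
    rw [PySem.List.pyRange_one_cons hab, List.foldl_cons]
    have hsh1 : shape (setI m i a v) = shape m := shape_setI _ _ _ _
    have hsh2 : shape (setI (setI m i a v) n2 a v) = shape m := by
      rw [shape_setI, hsh1]
    have hSq1 : SqN (setI m i a v) n0 := SqN_shape hsh1.symm hSq
    have hSq2 : SqN (setI (setI m i a v) n2 a v) n0 := SqN_shape hsh2.symm hSq
    rw [ih (a+1) _ hSq2 (by omega) (by omega) r c]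
    have c1 := SqN_cell hSq1 hn2 hn2N ha (by omega)
    have c0 := SqN_cell hSq hi hiN ha (by omega)
    rw [getc_setI _ _ _ _ hn2 ha c1.1 c1.2 r c,
        getc_setI _ _ _ _ hi ha c0.1 c0.2 r c]
    split_ifs <;> first | rfl | (exfalso; omega)

-- A's second inner loop (the two vertical edges of ring i)
lemma colPass (n0 v i n2 : Int) (hi : 0 ≤ i) (hn2 : 0 ≤ n2)
    (hiN : i < 2*n0 - 1) (hn2N : n2 < 2*n0 - 1) :
    ∀ (t : Nat) (a : Int) (m : List (List Int)), SqN m n0 → 0 ≤ a → (n2 + 1 - a).toNat = t →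
    ∀ (r c : Nat),
      getc ((PySem.List.pyRange a (n2+1) 1).foldl
              (fun m k => setI (setI m k i v) k n2 v) m) r c
        = if (a ≤ (r:Int) ∧ (r:Int) ≤ n2) ∧ ((c:Int) = i ∨ (c:Int) = n2) then some v
          else getc m r c := by
  intro t
  induction t with
  | zero =>
    intro a m hSq ha ht r c
    rw [PySem.List.pyRange_one_eq_nil (by omega), List.foldl_nil,
        if_neg (by rintro ⟨⟨h1, h2⟩, _⟩; omega)]
  | succ t ih =>
    intro a m hSq ha ht r c
    have hab : a < n2 + 1 := by omega
    rw [PySem.List.pyRange_one_cons hab, List.foldl_cons]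
    have hsh1 : shape (setI m a i v) = shape m := shape_setI _ _ _ _
    have hsh2 : shape (setI (setI m a i v) a n2 v) = shape m := by
      rw [shape_setI, hsh1]
    have hSq1 : SqN (setI m a i v) n0 := SqN_shape hsh1.symm hSq
    have hSq2 : SqN (setI (setI m a i v) a n2 v) n0 := SqN_shape hsh2.symm hSq
    rw [ih (a+1) _ hSq2 (by omega) (by omega) r c]
    have c1 := SqN_cell hSq1 ha (by omega) hn2 hn2N
    have c0 := SqN_cell hSq ha (by omega) hi hiN
    rw [getc_setI _ _ _ _ ha hn2 c1.1 c1.2 r c,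
        getc_setI _ _ _ _ ha hi c0.1 c0.2 r c]
    split_ifs <;> first | rfl | (exfalso; omega)

-- A's outer loop paints every ring with index ≥ i
lemma loopA (n0 : Int) (hn0 : 1 ≤ n0) :
    ∀ (f : Nat) (i n2 n : Int) (m : List (List Int)), SqN m n0 → 0 ≤ i →
      i + (f : Int) = n0 → n2 = 2*n0 - 2 - i → n = n0 - i →
    ∀ (r c : Nat),
      getc (llenarLoop m n2 n i f) r c
        = if (r:Int) < 2*n0 - 1 ∧ (c:Int) < 2*n0 - 1 ∧
             i ≤ min (min (r:Int) (c:Int)) (min (2*n0 - 2 - (r:Int)) (2*n0 - 2 - (c:Int)))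
          then some (n0 - min (min (r:Int) (c:Int)) (min (2*n0 - 2 - (r:Int)) (2*n0 - 2 - (c:Int))))
          else getc m r c := by
  intro f
  induction f with
  | zero =>
    intro i n2 n m hSq hi hif hn2 hn r c
    rw [llenarLoop, if_neg (by rintro ⟨h1, h2, h3⟩; omega)]
  | succ f ih =>
    intro i n2 n m hSq hi hif hn2 hn r c
    have hin : i ≤ n0 - 1 := by omega
    rw [llenarLoop]
    have hshr : shape ((PySem.List.pyRange i (n2+1) 1).foldl
        (fun m j => setI (setI m i j n) n2 j n) m) = shape m :=
      shape_foldl _ (fun m x => by rw [shape_setI, shape_setI]) _ m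
    have hSqr : SqN ((PySem.List.pyRange i (n2+1) 1).foldl
        (fun m j => setI (setI m i j n) n2 j n) m) n0 := SqN_shape hshr.symm hSq
    have hshc : shape ((PySem.List.pyRange (i+1) (n2+1) 1).foldl
        (fun m k => setI (setI m k i n) k n2 n)
        ((PySem.List.pyRange i (n2+1) 1).foldl
          (fun m j => setI (setI m i j n) n2 j n) m)) = shape m := by
      rw [shape_foldl _ (fun m x => by rw [shape_setI, shape_setI]), hshr]
    have hSqc : SqN _ n0 := SqN_shape hshc.symm hSq
    rw [ih (i+1) (n2-1) (n-1) _ hSqc (by omega) (by omega) (by omega) (by omega) r c]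
    rw [colPass n0 n i n2 hi (by omega) (by omega) (by omega)
          (n2 + 1 - (i+1)).toNat (i+1) _ hSqr (by omega) rfl r c]
    rw [rowPass n0 n i n2 hi (by omega) (by omega) (by omega)
          (n2 + 1 - i).toNat i m hSq hi rfl r c]
    subst hn hn2
    split_ifs <;> first | rfl | (exfalso; omega) | (simp only [Option.some.injEq]; omega)

-- B's inner loop: one row of the square, each cell written once with its own value
lemma colFill (n0 : Int) (g : Int → Int) (r0 : Int) (h0 : 0 ≤ r0) (hr0 : r0 < 2*n0 - 1) :
    ∀ (t : Nat) (a : Int) (m : List (List Int)), SqN m n0 → 0 ≤ a → (2*n0 - 1 - a).toNat = t →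
    ∀ (r c : Nat),
      getc ((PySem.List.pyRange a (2*n0 - 1) 1).foldl
              (fun mat c' => setI mat r0 c' (g c')) m) r c
        = if (r:Int) = r0 ∧ a ≤ (c:Int) ∧ (c:Int) < 2*n0 - 1 then some (g c)
          else getc m r c := by
  intro t
  induction t with
  | zero =>
    intro a m hSq ha ht r c
    rw [PySem.List.pyRange_one_eq_nil (by omega), List.foldl_nil,
        if_neg (by rintro ⟨_, h1, h2⟩; omega)]
  | succ t ih =>
    intro a m hSq ha ht r c
    have hab : a < 2*n0 - 1 := by omega
    rw [PySem.List.pyRange_one_cons hab, List.foldl_cons]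
    have hsh : shape (setI m r0 a (g a)) = shape m := shape_setI _ _ _ _
    have hSq1 : SqN (setI m r0 a (g a)) n0 := SqN_shape hsh.symm hSq
    rw [ih (a+1) _ hSq1 (by omega) (by omega) r c]
    have c0 := SqN_cell hSq h0 hr0 ha hab
    rw [getc_setI _ _ _ _ h0 ha c0.1 c0.2 r c]
    by_cases h1 : (r:Int) = r0 ∧ a + 1 ≤ (c:Int) ∧ (c:Int) < 2*n0 - 1
    · rw [if_pos h1, if_pos (by omega)]
    · rw [if_neg h1]
      by_cases h2 : (r:Int) = r0 ∧ (c:Int) = a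
      · rw [if_pos h2, if_pos (by omega), h2.2]
      · rw [if_neg h2, if_neg (by omega)]

-- B's outer loop over the rows of the square
lemma rowFill (n0 : Int) (G : Int → Int → Int) :
    ∀ (t : Nat) (a : Int) (m : List (List Int)), SqN m n0 → 0 ≤ a → (2*n0 - 1 - a).toNat = t →
    ∀ (r c : Nat),
      getc ((PySem.List.pyRange a (2*n0 - 1) 1).foldl
              (fun mat r' => (PySem.List.pyRange 0 (2*n0 - 1) 1).foldl
                 (fun mat c' => setI mat r' c' (G r' c')) mat) m) r c
        = if (a ≤ (r:Int) ∧ (r:Int) < 2*n0 - 1) ∧ (c:Int) < 2*n0 - 1 then some (G r c)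
          else getc m r c := by
  intro t
  induction t with
  | zero =>
    intro a m hSq ha ht r c
    rw [PySem.List.pyRange_one_eq_nil (a := a) (by omega), List.foldl_nil,
        if_neg (by rintro ⟨⟨h1, h2⟩, _⟩; omega)]
  | succ t ih =>
    intro a m hSq ha ht r c
    have hab : a < 2*n0 - 1 := by omega
    rw [PySem.List.pyRange_one_cons (a := a) hab, List.foldl_cons]
    have hsh : shape ((PySem.List.pyRange 0 (2*n0 - 1) 1).foldl
        (fun mat c' => setI mat a c' (G a c')) m) = shape m :=
      shape_foldl _ (fun m x => by rw [shape_setI]) _ m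
    have hSq1 : SqN _ n0 := SqN_shape hsh.symm hSq
    rw [ih (a+1) _ hSq1 (by omega) (by omega) r c]
    rw [colFill n0 (fun c' => G a c') a ha hab (2*n0 - 1 - 0).toNat 0 m hSq (by omega) rfl r c]
    by_cases h1 : (a + 1 ≤ (r:Int) ∧ (r:Int) < 2*n0 - 1) ∧ (c:Int) < 2*n0 - 1
    · rw [if_pos h1, if_pos (by omega)]
    · rw [if_neg h1]
      by_cases h2 : (r:Int) = a ∧ 0 ≤ (c:Int) ∧ (c:Int) < 2*n0 - 1
      · rw [if_pos h2, if_pos (by omega), h2.1]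
      · rw [if_neg h2, if_neg (by omega)]

lemma shape_llenarLoop : ∀ (f : Nat) (m : List (List Int)) (n2 n i : Int),
    shape (llenarLoop m n2 n i f) = shape m := by
  intro f
  induction f with
  | zero => intro m n2 n i; rfl
  | succ f ih =>
    intro m n2 n i
    rw [llenarLoop, ih, shape_foldl _ (fun m x => by rw [shape_setI, shape_setI]),
        shape_foldl _ (fun m x => by rw [shape_setI, shape_setI])]

lemma llenar_alt_eq (matriz : List (List Int)) (numero : Int) :
    llenar_alt matriz numero
      = (PySem.List.pyRange 0 (2*numero - 1) 1).foldl (fun mat r =>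
          (PySem.List.pyRange 0 (2*numero - 1) 1).foldl (fun mat c =>
            setI mat r c (numero - min (min r c)
              (min (2*numero - 2 - r) (2*numero - 2 - c)))) mat) matriz := rfl

lemma SqN_of_pre (matriz : List (List Int)) (numero : Int) (hn : 1 ≤ numero)
    (hPre : Pre_llenar matriz numero) : SqN matriz numero := by
  rcases hPre with h | ⟨h1, h2⟩
  · omega
  refine ⟨h1, ?_⟩
  intro r hr
  have hrlen : r < matriz.length := by omega
  have hrt : r < (matriz.take (2*numero - 1).toNat).length := by
    rw [List.length_take]; omega
  have hmem : matriz.getD r [] ∈ matriz.take (2*numero - 1).toNat := by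
    rw [List.getD_eq_getElem _ _ hrlen]
    have he : (matriz.take (2*numero - 1).toNat)[r] = matriz[r] := List.getElem_take
    rw [← he]
    exact List.getElem_mem hrt
  exact h2 _ hmem

-- ===== VERDICT (by name: the statement is the Claim_ definition above) =====
theorem llenar_spec : Claim_equal_llenar := by
  unfold Claim_equal_llenar Spec_llenar
  intro matriz numero hDom hPre
  by_cases hn : numero ≤ 0
  · have h0 : numero.toNat = 0 := by omega
    rw [llenar_alt_eq, PySem.List.pyRange_one_eq_nil (by omega), List.foldl_nil]
    unfold llenar
    rw [h0]
    rfl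
  · push Not at hn
    have hn1 : 1 ≤ numero := hn
    have hSq := SqN_of_pre matriz numero hn1 hPre
    apply mat_ext
    · unfold llenar
      rw [shape_llenarLoop, llenar_alt_eq]
      exact (shape_foldl _ (fun m x =>
        shape_foldl _ (fun m x => by rw [shape_setI]) _ m) _ matriz).symm
    · intro r c
      have hA := loopA numero hn1 numero.toNat 0 (numero*2-2) numero matriz hSq le_rfl
        (by omega) (by omega) (by omega) r c
      have hB := rowFill numero
        (fun r' c' => numero - min (min r' c') (min (2*numero - 2 - r') (2*numero - 2 - c')))
        (2*numero - 1 - 0).toNat 0 matriz hSq le_rfl rfl r c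
      unfold llenar
      rw [hA, llenar_alt_eq, hB]
      split_ifs <;> first | rfl | (exfalso; omega) | (simp only [Option.some.injEq]; omega)
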